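-- pv_equiv track=rewrite | github.com/vijethkash123/DSAPractice | Interview questions/TwillioInterviewQ3.py | countDelayedFlights
-- ===== SOURCE A (Python) =====
-- from collections import defaultdict, deque
-- import copy
--
-- def countDelayedFlights(flight_nodes, flight_from, flight_to, delayed):
--     # Step 1: Create adjacency list for the graph
--     graph = defaultdict(list)
--     for frm, to in zip(flight_from, flight_to):
--         graph[to].append(frm)
--
--     # Step 2: Set to keep track of delayed flights
--     delayed_flights = set(delayed)
--     queue = deque(delayed)
--     initial = copy.deepcopy(delayed_flights)
--
--     def dfs(flight):
--         for nei in graph[flight]: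
--             if nei not in delayed_flights:
--                 delayed_flights.add(nei)
--                 dfs(nei)
--
--     for i in initial:
--         dfs(i)
--
--
--     # Step 4: Convert the set to a sorted list
--     result = sorted(delayed_flights)
--
--     return result
-- ===== SOURCE B (Python) =====
-- def countDelayedFlights(flight_nodes, flight_from, flight_to, delayed):
--     # Fixed-point iteration over the raw edge list: no adjacency structure, no recursion.
--     edges = list(zip(flight_from, flight_to))
--     delayed_set = set(delayed)
--     changed = True
--     while changed:
--         changed = False
--         for frm, to in edges:
--             if to in delayed_set and frm not in delayed_set:
--                 delayed_set.add(frm)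
--                 changed = True
--     return sorted(delayed_set)
-- ===== Notes on version B (the rewrite author's own statement) =====
-- stated objective: alternative
-- what changed: Replaces the reverse adjacency dict plus recursive dfs (and the deepcopy of the seed set) by repeated fixed-point sweeps over the raw edge list, marking frm whenever to is already delayed, until a full sweep changes nothing; no graph structure, no recursion, no worklist.
import Mathlib
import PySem

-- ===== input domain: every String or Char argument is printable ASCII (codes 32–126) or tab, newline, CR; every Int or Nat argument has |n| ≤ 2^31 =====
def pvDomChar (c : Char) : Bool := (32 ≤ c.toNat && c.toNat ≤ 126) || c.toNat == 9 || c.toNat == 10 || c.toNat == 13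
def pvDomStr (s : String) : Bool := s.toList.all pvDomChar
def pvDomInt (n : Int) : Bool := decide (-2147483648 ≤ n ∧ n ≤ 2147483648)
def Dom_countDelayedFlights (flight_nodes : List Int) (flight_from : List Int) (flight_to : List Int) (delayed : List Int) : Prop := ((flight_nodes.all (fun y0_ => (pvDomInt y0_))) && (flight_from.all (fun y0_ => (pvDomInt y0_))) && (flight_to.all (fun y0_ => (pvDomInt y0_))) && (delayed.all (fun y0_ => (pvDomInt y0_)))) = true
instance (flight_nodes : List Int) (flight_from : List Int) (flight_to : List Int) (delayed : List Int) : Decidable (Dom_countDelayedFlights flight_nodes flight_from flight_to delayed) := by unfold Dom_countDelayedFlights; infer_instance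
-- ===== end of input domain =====

-- B replaces A's reverse adjacency dict + recursive dfs (and its deepcopy of the seed set) by
-- repeated fixed-point sweeps over the raw edge list until a sweep changes nothing;
-- objective: alternative (different algorithm, not claimed faster).

-- ===== PORT A =====
-- A's recursive dfs; the visited set is threaded through the fold over graph[flight].
-- fuel is a totality guard only: each recursive call first adds a fresh element of flight_from
-- to the visited set, so depth ≤ flight_from.length + 1 and the fuel never runs out (proved below).
-- (Python's defaultdict access graph[flight] inserts [] for a missing key; that mutation never
-- changes the value any lookup returns, so graph stays a pure value and lookup is getD _ [].)
def pvDfsA (g : PySem.Dict Int (List Int)) : Nat → Int → PySem.Set Int → PySem.Set Int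
  | 0, _, vis => vis
  | fuel+1, flight, vis =>
      (g.getD flight []).foldl
        (fun vis nei => if nei ∈ vis then vis else pvDfsA g fuel nei (PySem.Set.add vis nei)) vis

def countDelayedFlights (flight_nodes : List Int) (flight_from : List Int) (flight_to : List Int) (delayed : List Int) : List Int :=
  -- Step 1: graph[to].append(frm) over zip(flight_from, flight_to)
  let graph := (flight_from.zip flight_to).foldl
      (fun g p => PySem.Dict.modify g p.2 [] (fun l => l ++ [p.1])) PySem.Dict.empty
  -- Step 2
  let delayedFlights := PySem.Set.ofList delayed
  let initial := delayedFlights          -- copy.deepcopy(delayed_flights)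
  -- for i in initial: dfs(i)   (iteration over a set: the resulting SET is order-independent,
  -- and only the sorted set is returned, so processing in first-insertion order is exact)
  let final := initial.foldl (fun vis i => pvDfsA graph (flight_from.length + 1) i vis) delayedFlights
  -- Step 4
  PySem.List.sorted final (fun x => x) false

-- ===== PORT B =====
-- one sweep step: 'if to in delayed_set and frm not in delayed_set: add frm; changed = True'
def pvStepB (q : PySem.Set Int × Bool) (p : Int × Int) : PySem.Set Int × Bool :=
  if p.2 ∈ q.1 ∧ p.1 ∉ q.1 then (PySem.Set.add q.1 p.1, true) else q

-- the 'while changed' loop: each round is one full sweep of the edge list; fuel is a totality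
-- guard only: every round that continues has added a fresh element of flight_from to the set,
-- so at most flight_from.length + 1 rounds run (proved below).
def pvIterB (edges : List (Int × Int)) : Nat → PySem.Set Int → PySem.Set Int
  | 0, vis => vis
  | fuel+1, vis =>
      let q := edges.foldl pvStepB (vis, false)
      if q.2 then pvIterB edges fuel q.1 else q.1

def countDelayedFlights_alt (flight_nodes : List Int) (flight_from : List Int) (flight_to : List Int) (delayed : List Int) : List Int :=
  let edges := flight_from.zip flight_to
  let final := pvIterB edges (flight_from.length + 1) (PySem.Set.ofList delayed)
  PySem.List.sorted final (fun x => x) false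

-- ===== PRECONDITION & SPEC =====
def Spec_countDelayedFlights (flight_nodes : List Int) (flight_from : List Int) (flight_to : List Int) (delayed : List Int) (out : List Int) : Prop := out = countDelayedFlights_alt flight_nodes flight_from flight_to delayed
instance (flight_nodes : List Int) (flight_from : List Int) (flight_to : List Int) (delayed : List Int) (out : List Int) : Decidable (Spec_countDelayedFlights flight_nodes flight_from flight_to delayed out) := by unfold Spec_countDelayedFlights; infer_instance

-- ===== CLAIM (what is proved, stated in full; the proofs are below) =====
def Claim_equal_countDelayedFlights : Prop := ∀ (flight_nodes : List Int) (flight_from : List Int) (flight_to : List Int) (delayed : List Int), Dom_countDelayedFlights flight_nodes flight_from flight_to delayed → Spec_countDelayedFlights flight_nodes flight_from flight_to delayed (countDelayedFlights flight_nodes flight_from flight_to delayed)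

-- ===== LEMMAS AND PROOFS =====

-- x is "delayed" iff it is a seed or an edge (x, y) leads into a delayed y (the reverse-closure).
inductive pvReach (edges : List (Int × Int)) (seeds : List Int) : Int → Prop
  | seed {x : Int} : x ∈ seeds → pvReach edges seeds x
  | step {x y : Int} : pvReach edges seeds y → (x, y) ∈ edges → pvReach edges seeds x

-- all reverse-neighbours of x already collected in S
def pvDone (g : PySem.Dict Int (List Int)) (S : List Int) (x : Int) : Prop :=
  ∀ n ∈ g.getD x [], n ∈ S

-- measure: number of candidate sources not yet visited
def pvM (ffrom : List Int) (vis : List Int) : Nat :=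
  (ffrom.toFinset \ vis.toFinset).card

theorem pvDone_mono (g : PySem.Dict Int (List Int)) (S S' : List Int) (x : Int)
    (h : pvDone g S x) (hs : ∀ a ∈ S, a ∈ S') : pvDone g S' x :=
  fun n hn => hs n (h n hn)

theorem pvM_le (ffrom vis : List Int) : pvM ffrom vis ≤ ffrom.length :=
  le_trans (Finset.card_le_card (Finset.sdiff_subset)) (List.toFinset_card_le ffrom)

theorem pvM_antitone (ffrom vis vis' : List Int) (h : ∀ a ∈ vis, a ∈ vis') :
    pvM ffrom vis' ≤ pvM ffrom vis := by
  apply Finset.card_le_card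
  intro a ha
  simp only [Finset.mem_sdiff, List.mem_toFinset] at *
  exact ⟨ha.1, fun hv => ha.2 (h a hv)⟩

theorem pvM_add (ffrom : List Int) (vis : PySem.Set Int) (a : Int)
    (haf : a ∈ ffrom) (hav : a ∉ vis) :
    pvM ffrom (PySem.Set.add vis a) + 1 = pvM ffrom vis := by
  have h1 : (PySem.Set.add vis a).toFinset = insert a vis.toFinset := by
    rw [PySem.Set.add_of_not_mem hav]
    ext x; simp
  unfold pvM
  rw [h1]
  have h2 : ffrom.toFinset \ insert a vis.toFinset = (ffrom.toFinset \ vis.toFinset).erase a := by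
    ext x; simp only [Finset.mem_sdiff, Finset.mem_insert, Finset.mem_erase]; tauto
  rw [h2, Finset.card_erase_of_mem (by simp [haf, hav])]
  have : a ∈ ffrom.toFinset \ vis.toFinset := by simp [haf, hav]
  have hpos : 0 < (ffrom.toFinset \ vis.toFinset).card := Finset.card_pos.mpr ⟨a, this⟩
  omega

-- the inner fold of A's dfs (over graph[flight]), given the dfs facts one fuel lower
theorem pvDfsA_fold (g : PySem.Dict Int (List Int)) (ffrom : List Int)
    (R : Int → Prop) (fuel : Nat)
    (IH : ∀ (flight : Int) (vis : PySem.Set Int), pvM ffrom vis < fuel →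
      (∀ v ∈ vis, R v) → R flight → vis.Nodup →
      (∀ a ∈ vis, a ∈ pvDfsA g fuel flight vis) ∧ (pvDfsA g fuel flight vis).Nodup ∧
      (∀ v ∈ pvDfsA g fuel flight vis, R v) ∧
      (∀ x ∈ pvDfsA g fuel flight vis, x ∉ vis → pvDone g (pvDfsA g fuel flight vis) x) ∧
      pvDone g (pvDfsA g fuel flight vis) flight) :
    ∀ (ns : List Int) (vis : PySem.Set Int) (out : PySem.Set Int),
      out = ns.foldl (fun vis nei => if nei ∈ vis then vis else pvDfsA g fuel nei (PySem.Set.add vis nei)) vis →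
      pvM ffrom vis < fuel + 1 → (∀ v ∈ vis, R v) → vis.Nodup →
      (∀ n ∈ ns, R n) → (∀ n ∈ ns, n ∈ ffrom) →
      (∀ a ∈ vis, a ∈ out) ∧ out.Nodup ∧ (∀ v ∈ out, R v) ∧
      (∀ x ∈ out, x ∉ vis → pvDone g out x) ∧ (∀ n ∈ ns, n ∈ out) := by
  intro ns
  induction ns with
  | nil =>
      intro vis out hout hm hR hnd _ _
      subst hout
      exact ⟨fun a ha => ha, hnd, hR, fun x hx hnx => absurd hx hnx, by simp⟩
  | cons nei ns ih =>
      intro vis out hout hm hR hnd hnsR hnsU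
      simp only [List.foldl_cons] at hout
      by_cases hmem : nei ∈ vis
      · rw [if_pos hmem] at hout
        obtain ⟨h1, h2, h3, h4, h5⟩ := ih vis out hout hm hR hnd
          (fun n hn => hnsR n (by simp [hn])) (fun n hn => hnsU n (by simp [hn]))
        exact ⟨h1, h2, h3, h4, by
          intro n hn
          rcases List.mem_cons.mp hn with h | h
          · rw [h]; exact h1 nei hmem
          · exact h5 n h⟩
      · rw [if_neg hmem] at hout
        have hRnei : R nei := hnsR nei (by simp)
        have hUnei : nei ∈ ffrom := hnsU nei (by simp)
        have hmadd : pvM ffrom (PySem.Set.add vis nei) < fuel := by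
          have := pvM_add ffrom vis nei hUnei hmem; omega
        have hsub0 : ∀ a ∈ vis, a ∈ PySem.Set.add vis nei := by
          intro a ha; exact (PySem.Set.mem_add vis nei a).mpr (Or.inl ha)
        obtain ⟨hA1, hA2, hA3, hA4, hA5⟩ := IH nei (PySem.Set.add vis nei) hmadd
          (by intro v hv
              rcases (PySem.Set.mem_add vis nei v).mp hv with h | h
              · exact hR v h
              · exact h ▸ hRnei)
          hRnei (PySem.Set.nodup_add vis nei hnd)
        obtain ⟨hB1, hB2, hB3, hB4, hB5⟩ := ih (pvDfsA g fuel nei (PySem.Set.add vis nei)) out hout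
          (lt_of_le_of_lt (pvM_antitone ffrom vis _ (fun a ha => hA1 a (hsub0 a ha))) hm)
          hA3 hA2 (fun n hn => hnsR n (by simp [hn])) (fun n hn => hnsU n (by simp [hn]))
        have hsub : ∀ a ∈ vis, a ∈ out := fun a ha => hB1 a (hA1 a (hsub0 a ha))
        refine ⟨hsub, hB2, hB3, ?_, ?_⟩
        · intro x hx hnx
          by_cases hx1 : x ∈ pvDfsA g fuel nei (PySem.Set.add vis nei)
          · by_cases hx2 : x ∈ PySem.Set.add vis nei
            · have hxe : x = nei := by
                rcases (PySem.Set.mem_add vis nei x).mp hx2 with h | h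
                · exact absurd h hnx
                · exact h
              exact pvDone_mono g _ out x (hxe ▸ hA5) hB1
            · exact pvDone_mono g _ out x (hA4 x hx1 hx2) hB1
          · exact hB4 x hx hx1
        · intro n hn
          rcases List.mem_cons.mp hn with h | h
          · rw [h]; exact hB1 nei (hA1 nei ((PySem.Set.mem_add vis nei nei).mpr (Or.inr rfl)))
          · exact hB5 n h

-- the main facts about A's dfs: under enough fuel, the visited set only grows, stays nodup,
-- stays sound for R, every node it adds is fully processed, and flight itself is fully processed
theorem pvDfsA_main (g : PySem.Dict Int (List Int)) (ffrom : List Int)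
    (hgU : ∀ x y, x ∈ g.getD y [] → x ∈ ffrom)
    (R : Int → Prop) (hR : ∀ x y, R y → x ∈ g.getD y [] → R x) :
    ∀ (fuel : Nat) (flight : Int) (vis : PySem.Set Int), pvM ffrom vis < fuel →
      (∀ v ∈ vis, R v) → R flight → vis.Nodup →
      (∀ a ∈ vis, a ∈ pvDfsA g fuel flight vis) ∧ (pvDfsA g fuel flight vis).Nodup ∧
      (∀ v ∈ pvDfsA g fuel flight vis, R v) ∧
      (∀ x ∈ pvDfsA g fuel flight vis, x ∉ vis → pvDone g (pvDfsA g fuel flight vis) x) ∧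
      pvDone g (pvDfsA g fuel flight vis) flight := by
  intro fuel
  induction fuel with
  | zero => intro flight vis hm; omega
  | succ fuel ih =>
      intro flight vis hm hRv hRf hnd
      have hfold := pvDfsA_fold g ffrom R fuel ih (g.getD flight []) vis
        (pvDfsA g (fuel+1) flight vis) (by simp [pvDfsA]) hm hRv hnd
        (fun n hn => hR n flight hRf hn) (fun n hn => hgU n flight hn)
      exact ⟨hfold.1, hfold.2.1, hfold.2.2.1, hfold.2.2.2.1, hfold.2.2.2.2⟩

-- the top-level 'for i in initial: dfs(i)' loop of A
theorem pvDfsA_top (g : PySem.Dict Int (List Int)) (ffrom : List Int)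
    (hgU : ∀ x y, x ∈ g.getD y [] → x ∈ ffrom)
    (R : Int → Prop) (hR : ∀ x y, R y → x ∈ g.getD y [] → R x) :
    ∀ (seeds' : List Int) (ds0 : List Int) (vis out : PySem.Set Int),
      out = seeds'.foldl (fun vis i => pvDfsA g (ffrom.length + 1) i vis) vis →
      (∀ v ∈ vis, R v) → vis.Nodup → (∀ s ∈ seeds', R s) →
      (∀ x ∈ vis, x ∉ ds0 → pvDone g vis x) →
      (∀ a ∈ vis, a ∈ out) ∧ out.Nodup ∧ (∀ v ∈ out, R v) ∧
      (∀ x ∈ out, x ∉ ds0 → pvDone g out x) ∧ (∀ s ∈ seeds', pvDone g out s) := by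
  intro seeds'
  induction seeds' with
  | nil =>
      intro ds0 vis out hout hRv hnd _ hcl
      subst hout
      exact ⟨fun a ha => ha, hnd, hRv, hcl, by simp⟩
  | cons i seeds' ih =>
      intro ds0 vis out hout hRv hnd hseedR hcl
      simp only [List.foldl_cons] at hout
      have hm : pvM ffrom vis < ffrom.length + 1 := lt_of_le_of_lt (pvM_le ffrom vis) (by omega)
      obtain ⟨hA1, hA2, hA3, hA4, hA5⟩ := pvDfsA_main g ffrom hgU R hR (ffrom.length + 1) i vis
        hm hRv (hseedR i (by simp)) hnd
      obtain ⟨hB1, hB2, hB3, hB4, hB5⟩ := ih ds0 (pvDfsA g (ffrom.length + 1) i vis) out hout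
        hA3 hA2 (fun s hs => hseedR s (by simp [hs]))
        (by intro x hx hnx
            by_cases hxv : x ∈ vis
            · exact pvDone_mono g vis _ x (hcl x hxv hnx) hA1
            · exact hA4 x hx hxv)
      refine ⟨fun a ha => hB1 a (hA1 a ha), hB2, hB3, hB4, ?_⟩
      intro s hs
      rcases List.mem_cons.mp hs with h | h
      · exact pvDone_mono g _ out s (h ▸ hA5) hB1
      · exact hB5 s h

-- once a sweep has set changed to true it stays true
theorem pvStepB_true (edges : List (Int × Int)) :
    ∀ s : PySem.Set Int, (edges.foldl pvStepB (s, true)).2 = true := by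
  induction edges with
  | nil => intro s; rfl
  | cons p ps ih =>
      intro s
      simp only [List.foldl_cons, pvStepB]
      by_cases h : p.2 ∈ s ∧ p.1 ∉ s
      · rw [if_pos h]; exact ih _
      · rw [if_neg h]; exact ih s

-- one full sweep of B over the edge list: set only grows, stays nodup and R-sound, the measure
-- does not grow; an unchanged sweep leaves the set intact and exhibits edge-closedness, and a
-- changed sweep strictly decreases the measure
theorem pvPassB_fold (ffrom : List Int) (R : Int → Prop) :
    ∀ (edges : List (Int × Int)),
      (∀ p ∈ edges, p.1 ∈ ffrom) → (∀ p ∈ edges, R p.2 → R p.1) →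
      ∀ (s : PySem.Set Int) (q : PySem.Set Int × Bool),
        q = edges.foldl pvStepB (s, false) →
        s.Nodup → (∀ v ∈ s, R v) →
        (∀ a ∈ s, a ∈ q.1) ∧ q.1.Nodup ∧ (∀ v ∈ q.1, R v) ∧
        (q.2 = false → q.1 = s ∧ ∀ p ∈ edges, p.2 ∈ s → p.1 ∈ s) ∧
        (q.2 = true → pvM ffrom q.1 + 1 ≤ pvM ffrom s) := by
  intro edges
  induction edges with
  | nil =>
      intro _ _ s q hq hnd hR
      subst hq
      exact ⟨fun a ha => ha, hnd, hR, fun _ => ⟨rfl, by simp⟩, by intro h; cases h⟩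
  | cons p ps ih =>
      intro hU hRe s q hq hnd hR
      simp only [List.foldl_cons] at hq
      by_cases hc : p.2 ∈ s ∧ p.1 ∉ s
      · rw [show pvStepB (s, false) p = (PySem.Set.add s p.1, true) from by
              simp [pvStepB, hc]] at hq
        have hRp : R p.1 := hRe p (by simp) (hR p.2 hc.1)
        have hUp : p.1 ∈ ffrom := hU p (by simp)
        have hsub0 : ∀ a ∈ s, a ∈ PySem.Set.add s p.1 := by
          intro a ha; exact (PySem.Set.mem_add s p.1 a).mpr (Or.inl ha)
        -- after setting changed, the sweep keeps changed = true; relate the tail fold from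
        -- (add s p.1, true) to the same tail fold from (add s p.1, false)
        have htrue : q.2 = true := by rw [hq]; exact pvStepB_true ps _
        -- the set component of a fold does not depend on the Bool component
        have hfst : ∀ (es : List (Int × Int)) (s' : PySem.Set Int) (b b' : Bool),
            (es.foldl pvStepB (s', b)).1 = (es.foldl pvStepB (s', b')).1 := by
          intro es
          induction es with
          | nil => intro s' b b'; rfl
          | cons e es ihe =>
              intro s' b b'
              simp only [List.foldl_cons, pvStepB]
              by_cases h : e.2 ∈ s' ∧ e.1 ∉ s'
              · rw [if_pos h, if_pos h]
              · rw [if_neg h, if_neg h]; exact ihe s' b b'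
        obtain ⟨h1, h2, h3, _, _⟩ := ih (fun e he => hU e (by simp [he]))
          (fun e he => hRe e (by simp [he])) (PySem.Set.add s p.1)
          (ps.foldl pvStepB (PySem.Set.add s p.1, false)) rfl
          (PySem.Set.nodup_add s p.1 hnd)
          (by intro v hv
              rcases (PySem.Set.mem_add s p.1 v).mp hv with h | h
              · exact hR v h
              · exact h ▸ hRp)
        have hq1 : q.1 = (ps.foldl pvStepB (PySem.Set.add s p.1, false)).1 := by
          rw [hq]; exact hfst ps (PySem.Set.add s p.1) true false
        refine ⟨?_, by rw [hq1]; exact h2, by rw [hq1]; exact h3, ?_, ?_⟩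
        · intro a ha; rw [hq1]; exact h1 a (hsub0 a ha)
        · intro hfalse; rw [htrue] at hfalse; cases hfalse
        · intro _
          have hmono : ∀ a ∈ PySem.Set.add s p.1, a ∈ q.1 := by
            intro a ha; rw [hq1]; exact h1 a ha
          have hdec := pvM_add ffrom s p.1 hUp hc.2
          have := pvM_antitone ffrom (PySem.Set.add s p.1) q.1 hmono
          omega
      · rw [show pvStepB (s, false) p = (s, false) from by simp [pvStepB, hc]] at hq
        obtain ⟨h1, h2, h3, h4, h5⟩ := ih (fun e he => hU e (by simp [he]))
          (fun e he => hRe e (by simp [he])) s q hq hnd hR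
        refine ⟨h1, h2, h3, ?_, h5⟩
        intro hfalse
        obtain ⟨hq1, hcl⟩ := h4 hfalse
        refine ⟨hq1, ?_⟩
        intro e he hin
        rcases List.mem_cons.mp he with h | h
        · subst h
          by_cases hp1 : e.1 ∈ s
          · exact hp1
          · exact absurd ⟨hin, hp1⟩ hc
        · exact hcl e h hin

-- B's outer while-loop: with enough fuel it reaches the fixed point — a nodup, R-sound,
-- edge-closed superset of the starting set
theorem pvIterB_main (edges : List (Int × Int)) (ffrom : List Int) (R : Int → Prop)
    (hU : ∀ p ∈ edges, p.1 ∈ ffrom) (hRe : ∀ p ∈ edges, R p.2 → R p.1) :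
    ∀ (fuel : Nat) (vis : PySem.Set Int), pvM ffrom vis < fuel →
      vis.Nodup → (∀ v ∈ vis, R v) →
      (∀ a ∈ vis, a ∈ pvIterB edges fuel vis) ∧ (pvIterB edges fuel vis).Nodup ∧
      (∀ v ∈ pvIterB edges fuel vis, R v) ∧
      (∀ p ∈ edges, p.2 ∈ pvIterB edges fuel vis → p.1 ∈ pvIterB edges fuel vis) := by
  intro fuel
  induction fuel with
  | zero => intro vis hm; omega
  | succ fuel ih =>
      intro vis hm hnd hR
      obtain ⟨h1, h2, h3, h4, h5⟩ := pvPassB_fold ffrom R edges hU hRe vis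
        (edges.foldl pvStepB (vis, false)) rfl hnd hR
      set q := edges.foldl pvStepB (vis, false) with hqdef
      have hiter : pvIterB edges (fuel+1) vis = if q.2 then pvIterB edges fuel q.1 else q.1 := rfl
      cases hq2 : q.2 with
      | false =>
          obtain ⟨hq1, hcl⟩ := h4 hq2
          rw [hiter, hq2, if_neg (by simp), hq1]
          exact ⟨fun a ha => ha, hnd, hR, hcl⟩
      | true =>
          have hmq : pvM ffrom q.1 < fuel := by have := h5 hq2; omega
          obtain ⟨hB1, hB2, hB3, hB4⟩ := ih q.1 hmq h2 h3
          rw [hiter, hq2, if_pos (by simp)]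
          exact ⟨fun a ha => hB1 a (h1 a ha), hB2, hB3, hB4⟩

-- the graph built by A's port: membership in graph[y] is exactly the edge list
theorem pvGraph_getD_aux :
    ∀ (es : List (Int × Int)) (d : PySem.Dict Int (List Int)) (x y : Int),
      x ∈ (es.foldl (fun g p => PySem.Dict.modify g p.2 [] (fun l => l ++ [p.1])) d).getD y [] ↔
      x ∈ d.getD y [] ∨ (x, y) ∈ es := by
  intro es
  induction es with
  | nil => intro d x y; simp
  | cons e es ih =>
      intro d x y
      obtain ⟨a, b⟩ := e
      simp only [List.foldl_cons]
      rw [ih, PySem.Dict.getD_modify d b y [] (fun l => l ++ [a])]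
      by_cases hy : y = b
      · subst hy
        simp only [if_true, List.mem_append, List.mem_cons, Prod.mk.injEq, and_true]
        tauto
      · simp only [if_neg hy, List.mem_cons, Prod.mk.injEq]
        constructor
        · rintro (h | h)
          · exact Or.inl h
          · exact Or.inr (Or.inr h)
        · rintro (h | ⟨h1, h2⟩ | h)
          · exact Or.inl h
          · exact absurd h2 hy
          · exact Or.inr h

theorem pvGraph_getD (ffrom fto : List Int) (x y : Int) :
    x ∈ ((ffrom.zip fto).foldl (fun g p => PySem.Dict.modify g p.2 [] (fun l => l ++ [p.1]))
        PySem.Dict.empty).getD y [] ↔ (x, y) ∈ ffrom.zip fto := by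
  rw [pvGraph_getD_aux]
  simp [PySem.Dict.empty, PySem.Dict.getD, PySem.Dict.get?]

-- a nodup set containing the seeds, sound and edge-closed, IS the closure
theorem pvClosed_iff (edges : List (Int × Int)) (seeds : List Int) (S : List Int)
    (hseed : ∀ s ∈ seeds, s ∈ S)
    (hsound : ∀ x ∈ S, pvReach edges seeds x)
    (hclosed : ∀ p ∈ edges, p.2 ∈ S → p.1 ∈ S) :
    ∀ x, x ∈ S ↔ pvReach edges seeds x := by
  intro x
  constructor
  · exact hsound x
  · intro hr
    induction hr with
    | seed h => exact hseed _ h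
    | step hr he ih => exact hclosed _ he ih

-- ===== VERDICT (by name: the statement is the Claim_ definition above) =====
theorem countDelayedFlights_spec : Claim_equal_countDelayedFlights := by
  intro flight_nodes flight_from flight_to delayed _
  unfold Spec_countDelayedFlights countDelayedFlights countDelayedFlights_alt
  simp only []
  set g := (flight_from.zip flight_to).foldl
      (fun g p => PySem.Dict.modify g p.2 [] (fun l => l ++ [p.1])) PySem.Dict.empty with hgdef
  have hg : ∀ x y, x ∈ g.getD y [] ↔ (x, y) ∈ flight_from.zip flight_to :=
    fun x y => pvGraph_getD flight_from flight_to x y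
  have hgU : ∀ x y, x ∈ g.getD y [] → x ∈ flight_from :=
    fun x y h => (List.of_mem_zip ((hg x y).mp h)).1
  set R := pvReach (flight_from.zip flight_to) delayed with hRdef
  have hR : ∀ x y, R y → x ∈ g.getD y [] → R x :=
    fun x y hy hx => pvReach.step hy ((hg x y).mp hx)
  have hseedR : ∀ s ∈ PySem.Set.ofList delayed, R s :=
    fun s hs => pvReach.seed ((PySem.Set.mem_ofList delayed s).mp hs)
  -- A's final set
  obtain ⟨hA1, hA2, hA3, hA4, hA5⟩ := pvDfsA_top g flight_from hgU R hR
    (PySem.Set.ofList delayed) (PySem.Set.ofList delayed)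
    (PySem.Set.ofList delayed)
    ((PySem.Set.ofList delayed).foldl (fun vis i => pvDfsA g (flight_from.length + 1) i vis)
      (PySem.Set.ofList delayed)) rfl
    hseedR (PySem.Set.nodup_ofList delayed) hseedR
    (fun x hx hnx => absurd hx hnx)
  set SA := (PySem.Set.ofList delayed).foldl (fun vis i => pvDfsA g (flight_from.length + 1) i vis)
      (PySem.Set.ofList delayed) with hSAdef
  have hclA : ∀ p ∈ flight_from.zip flight_to, p.2 ∈ SA → p.1 ∈ SA := by
    intro p hp hin
    have hmem : p.1 ∈ g.getD p.2 [] := (hg p.1 p.2).mpr hp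
    by_cases hd : p.2 ∈ PySem.Set.ofList delayed
    · exact hA5 p.2 hd p.1 hmem
    · exact hA4 p.2 hin hd p.1 hmem
  have hiffA : ∀ x, x ∈ SA ↔ R x :=
    pvClosed_iff (flight_from.zip flight_to) delayed SA
      (fun s hs => hA1 s ((PySem.Set.mem_ofList delayed s).mpr hs)) hA3 hclA
  -- B's final set
  have hmB : pvM flight_from (PySem.Set.ofList delayed) < flight_from.length + 1 :=
    lt_of_le_of_lt (pvM_le flight_from (PySem.Set.ofList delayed)) (by omega)
  obtain ⟨hB1, hB2, hB3, hB4⟩ := pvIterB_main (flight_from.zip flight_to) flight_from R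
    (fun p hp => (List.of_mem_zip hp).1) (fun p hp h => pvReach.step h hp)
    (flight_from.length + 1) (PySem.Set.ofList delayed) hmB
    (PySem.Set.nodup_ofList delayed) hseedR
  set SB := pvIterB (flight_from.zip flight_to) (flight_from.length + 1)
      (PySem.Set.ofList delayed) with hSBdef
  have hiffB : ∀ x, x ∈ SB ↔ R x :=
    pvClosed_iff (flight_from.zip flight_to) delayed SB
      (fun s hs => hB1 s ((PySem.Set.mem_ofList delayed s).mpr hs)) hB3 hB4
  -- same members, both nodup ⇒ permutation ⇒ equal sorted lists
  have hperm : SA.Perm SB :=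
    (List.perm_ext_iff_of_nodup hA2 hB2).mpr (fun a => (hiffA a).trans (hiffB a).symm)
  exact PySem.List.sorted_eq_sorted_of_perm SA SB (fun x => x)
    (fun a b h => h) hperm
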